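-- pv_equiv track=rewrite | github.com/ffaure32/adventofcode2020 | day14/day14.py | calculate_masks
-- ===== SOURCE A (Python) =====
-- def calculate_masks(input_mask):
--     masks = [input_mask]
--     x_indexes = [pos for pos, char in enumerate(input_mask) if char == 'X']
--     for index in x_indexes:
--         new_masks = []
--         for mask in masks:
--             new_masks.append(replace_char_at_index(mask, index, 'Z'))
--             new_masks.append(replace_char_at_index(mask, index, '1'))
--             masks = new_masks
--     return masks
--
-- def replace_char_at_index(org_str, index, replacement):
--     new_str = org_str
--     if index < len(org_str):
--         new_str = org_str[0:index] + replacement + org_str[index + 1:]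
--     return new_str
-- ===== SOURCE B (Python) =====
-- def calculate_masks(input_mask):
--     x_indexes = [pos for pos, char in enumerate(input_mask) if char == 'X']
--     chars = list(input_mask)
--     out = []
--     def go(k):
--         if k == len(x_indexes):
--             out.append(''.join(chars))
--         else:
--             for c in 'Z1':
--                 chars[x_indexes[k]] = c
--                 go(k + 1)
--     go(0)
--     return out
-- ===== Notes on version B (the rewrite author's own statement) =====
-- stated objective: alternative
-- what changed: A rebuilds the entire mask list once per X (k list-doubling passes, re-slicing every mask each pass); B makes a single recursive descent over the X positions, filling one shared character buffer and emitting each completed mask at the leaves.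
import Mathlib
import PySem

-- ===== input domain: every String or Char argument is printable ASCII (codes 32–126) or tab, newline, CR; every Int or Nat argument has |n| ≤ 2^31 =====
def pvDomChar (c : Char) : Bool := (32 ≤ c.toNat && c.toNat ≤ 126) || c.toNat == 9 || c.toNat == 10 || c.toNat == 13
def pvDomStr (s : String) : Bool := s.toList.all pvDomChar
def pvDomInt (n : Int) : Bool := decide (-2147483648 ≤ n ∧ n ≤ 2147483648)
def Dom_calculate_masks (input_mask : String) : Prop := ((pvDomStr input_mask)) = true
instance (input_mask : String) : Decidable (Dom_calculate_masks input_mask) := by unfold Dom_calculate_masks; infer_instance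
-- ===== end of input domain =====

-- B replaces A's repeated list-doubling (rebuilding the whole mask list once per X)
-- by a single recursive enumeration that fills the X positions of one char buffer;
-- objective: alternative decomposition, same asymptotic cost.

-- ===== PORT A =====
-- string slicing/concatenation ported exactly at the code-point (List Char) level
def replace_char_at_index (org_str : String) (index : Int) (replacement : String) : String :=
  let new_str := org_str
  if index < PySem.Str.len org_str then
    String.ofList (PySem.List.slice org_str.toList (some 0) (some index)
      ++ replacement.toList
      ++ PySem.List.slice org_str.toList (some (index + 1)) none)
  else new_str

def calculate_masks (input_mask : String) : List String :=
  let masks := [input_mask]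
  let x_indexes := ((PySem.List.enumerate input_mask.toList 0).filter (fun pc => pc.2 == 'X')).map (·.1)
  -- 'masks = new_masks' inside the inner loop leaves masks = new_masks after each pass
  x_indexes.foldl (fun masks index =>
    masks.foldl (fun new_masks mask =>
      new_masks ++ [replace_char_at_index mask index "Z",
                    replace_char_at_index mask index "1"]) []) masks

-- ===== PORT B =====
-- go(k): for c in 'Z1': chars[x_indexes[k]] = c; recurse — ''.join(chars) at the leaves
def calcGo (x_indexes : List Int) (chars : List Char) : List String :=
  match x_indexes with
  | [] => [String.ofList chars]
  | i :: rest =>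
      calcGo rest (PySem.List.pySetD chars i 'Z') ++ calcGo rest (PySem.List.pySetD chars i '1')

def calculate_masks_alt (input_mask : String) : List String :=
  let x_indexes := ((PySem.List.enumerate input_mask.toList 0).filter (fun pc => pc.2 == 'X')).map (·.1)
  calcGo x_indexes input_mask.toList

-- ===== PRECONDITION & SPEC =====
def Spec_calculate_masks (input_mask : String) (out : List String) : Prop := out = calculate_masks_alt input_mask
instance (input_mask : String) (out : List String) : Decidable (Spec_calculate_masks input_mask out) := by unfold Spec_calculate_masks; infer_instance

-- ===== CLAIM (what is proved, stated in full; the proofs are below) =====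
def Claim_equal_calculate_masks : Prop := ∀ (input_mask : String), Dom_calculate_masks input_mask → Spec_calculate_masks input_mask (calculate_masks input_mask)

-- ===== LEMMAS AND PROOFS =====

-- A's inner pass over masks, as a function (what one iteration of A's outer loop does)
def pvStepA (masks : List String) (index : Int) : List String :=
  masks.foldl (fun new_masks mask =>
    new_masks ++ [replace_char_at_index mask index "Z",
                  replace_char_at_index mask index "1"]) []

lemma pvStepA_eq_flatMap (ms : List String) (i : Int) :
    pvStepA ms i = ms.flatMap (fun m => [replace_char_at_index m i "Z",
                                         replace_char_at_index m i "1"]) := by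
  simpa [pvStepA] using
    (List.flatMap_eq_foldl (f := fun m => [replace_char_at_index m i "Z",
                                           replace_char_at_index m i "1"]) (l := ms)).symm

lemma pvStepA_append (a b : List String) (i : Int) :
    pvStepA (a ++ b) i = pvStepA a i ++ pvStepA b i := by
  simp [pvStepA_eq_flatMap]

lemma pvFoldA_append (idxs : List Int) (a b : List String) :
    idxs.foldl pvStepA (a ++ b) = idxs.foldl pvStepA a ++ idxs.foldl pvStepA b := by
  induction idxs generalizing a b with
  | nil => rfl
  | cons i rest ih => simp only [List.foldl_cons, pvStepA_append, ih]

lemma pvRep_eq_set (chars : List Char) (k : Nat) (r : String) (c : Char)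
    (hr : r.toList = [c]) (hk : k < chars.length) :
    replace_char_at_index (String.ofList chars) (k : Int) r = String.ofList (chars.set k c) := by
  have hlt : (k : Int) < PySem.Str.len (String.ofList chars) := by
    simp [PySem.Str.len_eq]; exact_mod_cast hk
  have hcast : ((k : Int) + 1) = ((k + 1 : Nat) : Int) := by push_cast; ring
  simp only [replace_char_at_index, if_pos hlt, hr, hcast, String.toList_ofList,
    PySem.List.slice_zero_start, PySem.List.slice_to_natCast, PySem.List.slice_from_natCast]
  rw [List.set_eq_take_cons_drop c hk]
  simp

lemma pvGo_eq (idxs : List Int) (chars : List Char)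
    (hb : ∀ i ∈ idxs, ∃ k : Nat, i = (k : Int) ∧ k < chars.length) :
    idxs.foldl pvStepA [String.ofList chars] = calcGo idxs chars := by
  induction idxs generalizing chars with
  | nil => rfl
  | cons i rest ih =>
      obtain ⟨k, rfl, hk⟩ := hb i (List.mem_cons_self ..)
      have hstep : pvStepA [String.ofList chars] (k : Int)
          = [String.ofList (chars.set k 'Z')] ++ [String.ofList (chars.set k '1')] := by
        rw [pvStepA_eq_flatMap]
        simp [pvRep_eq_set chars k "Z" 'Z' (by decide) hk,
              pvRep_eq_set chars k "1" '1' (by decide) hk]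
      have hb' : ∀ c, ∀ i ∈ rest, ∃ k' : Nat, i = (k' : Int) ∧ k' < (chars.set k c).length := by
        intro c i hi
        obtain ⟨k', hik, hk'⟩ := hb i (List.mem_cons_of_mem _ hi)
        exact ⟨k', hik, by simpa using hk'⟩
      rw [List.foldl_cons, hstep, pvFoldA_append, ih _ (hb' 'Z'), ih _ (hb' '1')]
      simp [calcGo, PySem.List.pySetD_natCast]

lemma pvIdx_bound (s : String) :
    ∀ i ∈ ((PySem.List.enumerate s.toList 0).filter (fun pc => pc.2 == 'X')).map (·.1),
      ∃ k : Nat, i = (k : Int) ∧ k < s.toList.length := by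
  intro i hi
  simp only [List.mem_map, List.mem_filter] at hi
  obtain ⟨⟨j, c⟩, ⟨hmem, _⟩, rfl⟩ := hi
  rw [PySem.List.mem_enumerate_iff] at hmem
  obtain ⟨k, hk, hpc⟩ := hmem
  exact ⟨k, by simp [Prod.ext_iff] at hpc; simp [hpc.1], hk⟩

-- ===== VERDICT (by name: the statement is the Claim_ definition above) =====
theorem calculate_masks_spec : Claim_equal_calculate_masks := by
  intro s _
  show calculate_masks s = calculate_masks_alt s
  unfold calculate_masks calculate_masks_alt
  have h := pvGo_eq (((PySem.List.enumerate s.toList 0).filter (fun pc => pc.2 == 'X')).map (·.1))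
    s.toList (pvIdx_bound s)
  rw [String.ofList_toList] at h
  exact h
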